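-- pv_equiv track=rewrite | github.com/danielhers/DepEdit | depedit/depedit.py | bins_compatible
-- ===== SOURCE A (Python) =====
-- def bins_compatible(bin1, bin2):
--     overlap = False
--     non_overlap = False
--     for key in bin1:
--         if key in bin2:
--             if bin1[key] == bin2[key]:
--                 overlap = True
--         if key not in bin2:
--             non_overlap = True
--     return overlap and non_overlap
-- ===== SOURCE B (Python) =====
-- def bins_compatible(bin1, bin2):
--     # Sort-and-merge: walk the two sorted key lists in lockstep, setting the
--     # shared-equal-value flag on matches and the exclusive-key flag on keys
--     # of bin1 that the merge skips past.
--     ks1 = sorted(bin1)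
--     ks2 = sorted(bin2)
--     overlap = False
--     non_overlap = False
--     i = j = 0
--     while i < len(ks1):
--         if j == len(ks2) or ks1[i] < ks2[j]:
--             non_overlap = True
--             i += 1
--         elif ks2[j] < ks1[i]:
--             j += 1
--         else:
--             if bin1[ks1[i]] == bin2[ks2[j]]:
--                 overlap = True
--             i += 1
--             j += 1
--     return overlap and non_overlap
-- ===== Notes on version B (the rewrite author's own statement) =====
-- stated objective: alternative
-- what changed: Replaces A's single fused loop with membership tests into the other dict by a sort-and-merge: both key lists are sorted and walked in lockstep with two pointers, matches set the shared-equal-value flag and skipped bin1 keys set the exclusive-key flag.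
import Mathlib
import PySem

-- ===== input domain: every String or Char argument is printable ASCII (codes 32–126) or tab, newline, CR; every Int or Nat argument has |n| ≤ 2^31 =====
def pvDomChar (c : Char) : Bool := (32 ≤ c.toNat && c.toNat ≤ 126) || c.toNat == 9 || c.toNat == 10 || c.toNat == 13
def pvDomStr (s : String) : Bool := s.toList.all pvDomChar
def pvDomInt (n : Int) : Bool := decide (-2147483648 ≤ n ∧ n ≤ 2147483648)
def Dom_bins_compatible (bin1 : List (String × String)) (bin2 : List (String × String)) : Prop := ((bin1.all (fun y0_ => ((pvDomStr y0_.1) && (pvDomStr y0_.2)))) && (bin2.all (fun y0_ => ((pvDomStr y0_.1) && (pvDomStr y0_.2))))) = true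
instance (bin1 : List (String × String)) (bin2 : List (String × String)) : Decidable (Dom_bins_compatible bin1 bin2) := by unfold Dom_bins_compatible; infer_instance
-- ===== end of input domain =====

-- B replaces A's fused two-flag loop over bin1 (with hash-membership tests into bin2)
-- by a sort-and-merge two-pointer scan of the two sorted key lists (alternative; no speed claim).

-- ===== PORT A =====
def bins_compatible (bin1 : List (String × String)) (bin2 : List (String × String)) : Bool :=
  let d1 := PySem.Dict.ofList bin1
  let d2 := PySem.Dict.ofList bin2
  let st := d1.keys.foldl (fun (s : Bool × Bool) key =>
      let s1 := if d2.contains key then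
                  (if d1.get? key == d2.get? key then (true, s.2) else s)
                else s
      if !(d2.contains key) then (s1.1, true) else s1) (false, false)
  st.1 && st.2

-- ===== PORT B =====
-- the while-loop of Source B: two-pointer merge of the sorted key lists carrying the two flags
def bcMerge (d1 d2 : PySem.Dict String String) :
    List String → List String → Bool → Bool → Bool × Bool
  | [], _, ov, nov => (ov, nov)
  | _ :: xs, [], ov, _ => bcMerge d1 d2 xs [] ov true
  | x :: xs, y :: ys, ov, nov =>
    if x < y then bcMerge d1 d2 xs (y :: ys) ov true
    else if y < x then bcMerge d1 d2 (x :: xs) ys ov nov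
    else bcMerge d1 d2 xs ys (if d1.get? x == d2.get? y then true else ov) nov
  termination_by l1 l2 _ _ => l1.length + l2.length

def bins_compatible_alt (bin1 : List (String × String)) (bin2 : List (String × String)) : Bool :=
  let d1 := PySem.Dict.ofList bin1
  let d2 := PySem.Dict.ofList bin2
  let ks1 := PySem.List.sorted d1.keys (fun k => k) false
  let ks2 := PySem.List.sorted d2.keys (fun k => k) false
  let st := bcMerge d1 d2 ks1 ks2 false false
  st.1 && st.2

-- ===== PRECONDITION & SPEC =====
def Spec_bins_compatible (bin1 : List (String × String)) (bin2 : List (String × String)) (out : Bool) : Prop := out = bins_compatible_alt bin1 bin2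
instance (bin1 : List (String × String)) (bin2 : List (String × String)) (out : Bool) : Decidable (Spec_bins_compatible bin1 bin2 out) := by unfold Spec_bins_compatible; infer_instance

-- ===== CLAIM (what is proved, stated in full; the proofs are below) =====
def Claim_equal_bins_compatible : Prop := ∀ (bin1 : List (String × String)) (bin2 : List (String × String)), Dom_bins_compatible bin1 bin2 → Spec_bins_compatible bin1 bin2 (bins_compatible bin1 bin2)

-- ===== LEMMAS AND PROOFS =====

-- A's loop computes the two flags as 'any' predicates over bin1's keys
lemma bins_flags_foldl (p q : String → Bool) (ks : List String) (a b : Bool) :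
    ks.foldl (fun (s : Bool × Bool) key =>
      let s1 := if p key then (if q key then (true, s.2) else s) else s
      if !(p key) then (s1.1, true) else s1) (a, b)
    = (a || ks.any (fun k => p k && q k), b || ks.any (fun k => !(p k))) := by
  induction ks generalizing a b with
  | nil => simp
  | cons k ks ih =>
    simp only [List.foldl_cons, List.any_cons, ih]
    by_cases hp : p k <;> by_cases hq : q k <;> simp [hp, hq]

-- the merge scan over strictly sorted key lists computes the same two 'any' flags
lemma any_congr_mem {α : Type} {l : List α} {p q : α → Bool}
    (h : ∀ x ∈ l, p x = q x) : l.any p = l.any q := by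
  induction l with
  | nil => rfl
  | cons x xs ih =>
    simp only [List.any_cons, h x (List.mem_cons_self), ih (fun y hy => h y (List.mem_cons_of_mem x hy))]

lemma bcMerge_eq (d1 d2 : PySem.Dict String String)
    (l1 l2 : List String) (ov nov : Bool)
    (h1 : l1.Pairwise (· < ·)) (h2 : l2.Pairwise (· < ·)) :
    bcMerge d1 d2 l1 l2 ov nov =
      (ov || l1.any (fun k => decide (k ∈ l2) && (d1.get? k == d2.get? k)),
       nov || l1.any (fun k => !decide (k ∈ l2))) := by
  fun_induction bcMerge d1 d2 l1 l2 ov nov with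
  | case1 ov nov => simp
  | case2 x xs ov nov ih =>
    rw [ih (List.Pairwise.sublist (List.sublist_cons_self x xs) h1) (by simp)]
    simp
  | case3 x xs y ys ov nov hlt ih =>
    rw [ih (List.Pairwise.sublist (List.sublist_cons_self x xs) h1) h2]
    have hxy : x ≠ y := ne_of_lt hlt
    have hxys : x ∉ ys := fun hm =>
      absurd (lt_trans hlt ((List.pairwise_cons.1 h2).1 _ hm)) (lt_irrefl _)
    simp [hxy, hxys]
  | case4 x xs y ys ov nov hlt1 hlt2 ih =>
    rw [ih h1 (List.Pairwise.sublist (List.sublist_cons_self y ys) h2)]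
    have key : ∀ k ∈ x :: xs, (decide (k ∈ y :: ys) : Bool) = decide (k ∈ ys) := by
      intro k hk
      have hyk : y < k := by
        rcases List.mem_cons.1 hk with rfl | hk
        · exact hlt2
        · exact lt_trans hlt2 ((List.pairwise_cons.1 h1).1 _ hk)
      simp only [List.mem_cons, decide_eq_decide]
      constructor
      · rintro (rfl | h)
        · exact absurd hyk (lt_irrefl _)
        · exact h
      · exact Or.inr
    have e1 : (x :: xs).any (fun k => decide (k ∈ y :: ys) && (d1.get? k == d2.get? k))
        = (x :: xs).any (fun k => decide (k ∈ ys) && (d1.get? k == d2.get? k)) :=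
      any_congr_mem (fun k hk => by rw [key k hk])
    have e2 : (x :: xs).any (fun k => !decide (k ∈ y :: ys))
        = (x :: xs).any (fun k => !decide (k ∈ ys)) :=
      any_congr_mem (fun k hk => by rw [key k hk])
    rw [e1, e2]
  | case5 x xs y ys ov nov hlt1 hlt2 ih =>
    have hxy : x = y := le_antisymm (not_lt.1 hlt2) (not_lt.1 hlt1)
    subst hxy
    have key : ∀ k ∈ xs, (decide (k ∈ x :: ys) : Bool) = decide (k ∈ ys) := by
      intro k hk
      have hyk : x < k := (List.pairwise_cons.1 h1).1 _ hk
      simp only [List.mem_cons, decide_eq_decide]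
      constructor
      · rintro (rfl | h)
        · exact absurd hyk (lt_irrefl _)
        · exact h
      · exact Or.inr
    have e1 : xs.any (fun k => decide (k ∈ x :: ys) && (d1.get? k == d2.get? k))
        = xs.any (fun k => decide (k ∈ ys) && (d1.get? k == d2.get? k)) :=
      any_congr_mem (fun k hk => by rw [key k hk])
    have e2 : xs.any (fun k => !decide (k ∈ x :: ys))
        = xs.any (fun k => !decide (k ∈ ys)) :=
      any_congr_mem (fun k hk => by rw [key k hk])
    have ih' := ih (List.Pairwise.sublist (List.sublist_cons_self x xs) h1)
      (List.Pairwise.sublist (List.sublist_cons_self x ys) h2)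
    split_ifs at ih' ⊢ with he
    · rw [ih']
      simp only [List.any_cons]
      rw [e1, e2]
      simp [he]
    · rw [ih']
      simp only [List.any_cons]
      rw [e1, e2]
      simp [he]

lemma sorted_keys_pairwise_lt (d : PySem.Dict String String) (hnd : d.keys.Nodup) :
    (PySem.List.sorted d.keys (fun k => k) false).Pairwise (· < ·) := by
  have hle := PySem.List.sorted_pairwise d.keys (fun k => k) (κ := String)
  have hne : (PySem.List.sorted d.keys (fun k => k) false).Nodup :=
    (PySem.List.sorted_perm d.keys (fun k => k) false).nodup_iff.2 hnd
  have := List.Pairwise.and hle hne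
  exact this.imp (fun h => lt_of_le_of_ne h.1 h.2)

theorem bins_compatible_spec : Claim_equal_bins_compatible := by
  intro bin1 bin2 _
  unfold Spec_bins_compatible bins_compatible bins_compatible_alt
  dsimp only
  rw [bins_flags_foldl]
  rw [bcMerge_eq _ _ _ _ _ _
      (sorted_keys_pairwise_lt _ (PySem.Dict.nodup_keys_ofList bin1))
      (sorted_keys_pairwise_lt _ (PySem.Dict.nodup_keys_ofList bin2))]
  have hperm := (PySem.List.sorted_perm (PySem.Dict.ofList bin1).keys (fun k => k) false)
  have hmem : ∀ k, decide (k ∈ PySem.List.sorted (PySem.Dict.ofList bin2).keys (fun k => k) false)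
      = (PySem.Dict.ofList bin2).contains k := by
    intro k
    rw [PySem.Dict.contains_eq_decide_mem_keys]
    simp [PySem.List.mem_sorted]
  rw [hperm.any_eq, hperm.any_eq]
  simp only [hmem]
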